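-- pv_equiv track=rewrite | github.com/boukeversteegh/fairdice | roll.py | getAllPossibilities
-- ===== SOURCE A (Python) =====
-- def getAllPossibilities(ndice):
-- 	possibilities = []
-- 	if ndice == 2:
-- 		for i in range(6):
-- 			for j in range(6):
-- 				possibilities.append(i+j+2)
-- 	possibilities.sort()
-- 	return possibilities
-- ===== SOURCE B (Python) =====
-- def getAllPossibilities(ndice):
-- 	if ndice != 2:
-- 		return []
-- 	result = []
-- 	for s in range(2, 13):
-- 		result.extend([s] * (6 - abs(7 - s)))
-- 	return result
-- ===== Notes on version B (the rewrite author's own statement) =====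
-- stated objective: alternative
-- what changed: Instead of generating all ordered dice pairs and sorting, B emits each possible sum directly with its known multiplicity, producing the list already sorted with no sort call.
import Mathlib
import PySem

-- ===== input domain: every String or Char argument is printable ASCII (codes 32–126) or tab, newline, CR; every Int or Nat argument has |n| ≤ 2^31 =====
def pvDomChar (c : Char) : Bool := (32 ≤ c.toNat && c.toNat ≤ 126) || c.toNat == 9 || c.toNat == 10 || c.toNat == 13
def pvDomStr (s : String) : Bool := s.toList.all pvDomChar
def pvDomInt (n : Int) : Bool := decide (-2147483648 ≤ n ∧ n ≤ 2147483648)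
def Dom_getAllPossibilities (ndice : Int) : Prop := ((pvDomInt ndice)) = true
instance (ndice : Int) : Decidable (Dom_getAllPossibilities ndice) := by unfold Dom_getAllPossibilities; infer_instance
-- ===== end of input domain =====

-- B builds the two-dice sum list directly from the known multiplicities (6-|7-s|), no pair generation and no sort; equivalent alternative decomposition.


-- ===== PORT A =====
-- literal port of A: nested range(6) loops appending i+j+2, then sorted
def getAllPossibilities (ndice : Int) : List Int :=
  let possibilities : List Int := []
  let possibilities :=
    if ndice == 2 then
      (PySem.List.pyRange 0 6 1).foldl (fun acc i =>
        (PySem.List.pyRange 0 6 1).foldl (fun acc2 j => acc2 ++ [i + j + 2]) acc) possibilities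
    else possibilities
  PySem.List.sorted possibilities (fun x => x) false

-- ===== PORT B =====
-- port of B: each sum s in 2..12 repeated (6 - |7 - s|) times, already sorted
def getAllPossibilities_alt (ndice : Int) : List Int :=
  if ndice != 2 then []
  else (PySem.List.pyRange 2 13 1).foldl
    (fun acc s => acc ++ List.replicate (6 - (7 - s).natAbs) s) []

-- ===== PRECONDITION & SPEC =====
def Spec_getAllPossibilities (ndice : Int) (out : List Int) : Prop := out = getAllPossibilities_alt ndice
instance (ndice : Int) (out : List Int) : Decidable (Spec_getAllPossibilities ndice out) := by unfold Spec_getAllPossibilities; infer_instance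

-- ===== CLAIM (what is proved, stated in full; the proofs are below) =====
def Claim_equal_getAllPossibilities : Prop := ∀ (ndice : Int), Dom_getAllPossibilities ndice → Spec_getAllPossibilities ndice (getAllPossibilities ndice)

-- ===== LEMMAS AND PROOFS =====

-- ===== VERDICT (by name: the statement is the Claim_ definition above) =====
theorem getAllPossibilities_spec : Claim_equal_getAllPossibilities := by
  intro ndice _
  unfold Spec_getAllPossibilities getAllPossibilities getAllPossibilities_alt
  by_cases h : ndice = 2
  · subst h; decide
  · simp only [show (ndice == 2) = false from by simpa using h,
      show (ndice != 2) = true from by simpa using h, Bool.false_eq_true, if_false, if_true]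
    decide
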